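-- pv_equiv track=rewrite | github.com/R-m1n/Fortress-of-Solitude | hexanet/hexanet.py | normal_net
-- ===== SOURCE A (Python) =====
-- def normal_net(depth: int) -> list:
--     """
--     Returns a collection of highways each containing nodes with normal indices.
--
--     Parameters
--     ----------
--     depth: int
--         The number of highways.
--     """
--
--     nnet = [[0]]
--
--     counter = 0
--     control = 1
--     while counter < depth:
--         counter += 1
--         highway = []
--
--         for i in range(control, 6*counter+control):
--             highway.append(i)
--
--         control = highway[-1] + 1
--         nnet.append(highway)
--
--     return nnet
-- ===== SOURCE B (Python) =====
-- def normal_net(depth: int) -> list: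
--     """
--     Returns a collection of highways each containing nodes with normal indices.
--
--     Parameters
--     ----------
--     depth: int
--         The number of highways.
--     """
--     return [[0]] + [list(range(1 + 3*k*(k-1), 1 + 3*k*(k-1) + 6*k))
--                     for k in range(1, depth + 1)]
-- ===== Notes on version B (the rewrite author's own statement) =====
-- stated objective: simpler
-- what changed: Replaces the carried control accumulator, the inner append loop and the highway[-1] lookup by a closed-form start index 1+3k(k-1) for highway k, building the net as a single comprehension.
import Mathlib
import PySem

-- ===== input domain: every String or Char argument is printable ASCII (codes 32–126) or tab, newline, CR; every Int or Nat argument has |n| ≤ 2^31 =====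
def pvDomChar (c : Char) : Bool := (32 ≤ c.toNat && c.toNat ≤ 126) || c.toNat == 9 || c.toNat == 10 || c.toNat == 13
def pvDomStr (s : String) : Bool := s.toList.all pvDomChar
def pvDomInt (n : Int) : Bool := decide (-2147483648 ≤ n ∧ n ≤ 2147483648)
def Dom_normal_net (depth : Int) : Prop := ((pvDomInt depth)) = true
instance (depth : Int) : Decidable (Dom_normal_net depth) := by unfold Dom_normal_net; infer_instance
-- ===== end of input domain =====

-- B replaces A's carried `control` accumulator and inner append loop by the closed-form
-- start index 1 + 3k(k-1) of highway k, built as one comprehension (objective: simpler).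

-- ===== PORT A =====
-- the while loop: one step per iteration, fuel = number of iterations = depth.toNat
def normal_net_go : Nat → Int → Int → List (List Int) → List (List Int)
  | 0, _, _, nnet => nnet
  | n + 1, counter, control, nnet =>
      let counter := counter + 1
      -- for i in range(control, 6*counter+control): highway.append(i)
      let highway := (PySem.List.pyRange control (6 * counter + control) 1).foldl
        (fun h i => h ++ [i]) []
      -- control = highway[-1] + 1  (highway is never empty here; default 0 is unreachable)
      let control := (PySem.List.pyGet? highway (-1)).getD 0 + 1
      normal_net_go n counter control (nnet ++ [highway])

def normal_net (depth : Int) : List (List Int) :=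
  normal_net_go depth.toNat 0 1 [[0]]

-- ===== PORT B =====
def normal_net_alt (depth : Int) : List (List Int) :=
  [[0]] ++ (PySem.List.pyRange 1 (depth + 1) 1).map
    (fun k => PySem.List.pyRange (1 + 3 * k * (k - 1)) (1 + 3 * k * (k - 1) + 6 * k) 1)

-- ===== PRECONDITION & SPEC =====
def Spec_normal_net (depth : Int) (out : List (List Int)) : Prop := out = normal_net_alt depth
instance (depth : Int) (out : List (List Int)) : Decidable (Spec_normal_net depth out) := by unfold Spec_normal_net; infer_instance

-- ===== CLAIM (what is proved, stated in full; the proofs are below) =====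
def Claim_equal_normal_net : Prop := ∀ (depth : Int), Dom_normal_net depth → Spec_normal_net depth (normal_net depth)

-- ===== LEMMAS AND PROOFS =====

def pvBlk (k : Int) : List Int :=
  PySem.List.pyRange (1 + 3 * k * (k - 1)) (1 + 3 * k * (k - 1) + 6 * k) 1

-- loop invariant: after c iterations control = 1 + 3c(c+1); the remaining n iterations
-- append exactly the blocks for k = c+1 .. c+n
lemma normal_net_go_eq (n : Nat) : ∀ (c : Nat) (nnet : List (List Int)),
    normal_net_go n (c : Int) (1 + 3 * c * (c + 1)) nnet
      = nnet ++ (PySem.List.pyRange ((c : Int) + 1) ((c : Int) + (n : Int) + 1) 1).map pvBlk := by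
  induction n with
  | zero =>
      intro c nnet
      rw [PySem.List.pyRange_one_eq_nil (by push_cast; omega)]
      simp [normal_net_go]
  | succ n ih =>
      intro c nnet
      rw [normal_net_go]
      have hfold : ∀ (a b : Int),
          (PySem.List.pyRange a b 1).foldl (fun h i => h ++ [i]) ([] : List Int)
            = PySem.List.pyRange a b 1 := by
        intro a b
        simpa using PySem.List.foldl_append_singleton_eq_map
          (f := fun (i : Int) => i) (l := PySem.List.pyRange a b 1) (acc := ([] : List Int))
      simp only [hfold]
      have hc : (1 : Int) + 3 * c * (c + 1) < 6 * ((c : Int) + 1) + (1 + 3 * c * (c + 1)) := by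
        omega
      have hsplit : PySem.List.pyRange (1 + 3 * (c : Int) * (c + 1))
            (6 * ((c : Int) + 1) + (1 + 3 * c * (c + 1))) 1
          = PySem.List.pyRange (1 + 3 * (c : Int) * (c + 1))
              (6 * ((c : Int) + 1) + (1 + 3 * c * (c + 1)) - 1) 1
            ++ [6 * ((c : Int) + 1) + (1 + 3 * c * (c + 1)) - 1] := by
        have := PySem.List.pyRange_one_succ_right
          (a := 1 + 3 * (c : Int) * (c + 1))
          (b := 6 * ((c : Int) + 1) + (1 + 3 * c * (c + 1)) - 1) (by omega)
        simpa [sub_add_cancel] using this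
      rw [hsplit, PySem.List.pyGet?_neg_one_append_singleton]
      rw [← hsplit]
      simp only [Option.getD_some]
      have hctrl : 6 * ((c : Int) + 1) + (1 + 3 * c * (c + 1)) - 1 + 1
          = 1 + 3 * ((c : Int) + 1) * (((c : Int) + 1) + 1) := by ring
      have hcast : ((c : Int) + 1) = ((c + 1 : Nat) : Int) := by push_cast; ring
      rw [hctrl, hcast, ih (c + 1)]
      have hcons : PySem.List.pyRange ((c : Int) + 1) ((c : Int) + ((n : Int) + 1) + 1) 1
          = ((c : Int) + 1) :: PySem.List.pyRange ((c : Int) + 1 + 1) ((c : Int) + ((n : Int) + 1) + 1) 1 := by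
        exact PySem.List.pyRange_one_cons (by omega)
      have hblk : pvBlk ((c : Int) + 1)
          = PySem.List.pyRange (1 + 3 * (c : Int) * (c + 1))
              (6 * ((c : Int) + 1) + (1 + 3 * c * (c + 1))) 1 := by
        unfold pvBlk
        congr 1 <;> ring
      push_cast
      rw [hcons]
      simp only [List.map_cons, hblk]
      simp [List.append_assoc]
      ring_nf

-- ===== VERDICT (by name: the statement is the Claim_ definition above) =====
theorem normal_net_spec : Claim_equal_normal_net := by
  intro depth _
  unfold Spec_normal_net normal_net normal_net_alt
  have h0 : (1 : Int) + 3 * (0 : Nat) * ((0 : Nat) + 1) = 1 := by norm_num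
  have := normal_net_go_eq depth.toNat 0 [[0]]
  rw [h0] at this
  simp only [Nat.cast_zero, zero_add] at this
  rw [this]
  congr 2
  by_cases hd : 0 ≤ depth
  · congr 1
    omega
  · rw [PySem.List.pyRange_one_eq_nil (by omega),
        PySem.List.pyRange_one_eq_nil (by omega)]
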